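-- pv_equiv track=rewrite | github.com/avinmaster/um-hackathon | docs/render_pdf.py | strip_first_h1_block
-- ===== SOURCE A (Python) =====
-- def strip_first_h1_block(md_text: str) -> str:
--     """Remove the first H1 + its leading metadata block; the cover page replaces it."""
--     lines = md_text.splitlines()
--     out = []
--     seen_h1 = False
--     skipping_meta = False
--     for i, line in enumerate(lines):
--         if not seen_h1 and line.startswith("# "):
--             seen_h1 = True
--             skipping_meta = True
--             continue
--         if skipping_meta:
--             # Skip the bold metadata lines (**Product:** ..., **Submission:** ..., **Scope:** ..., **Status:** ...)
--             if line.strip().startswith("**") or line.strip() == "" or line.strip() == "---":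
--                 continue
--             skipping_meta = False
--         out.append(line)
--     return "\n".join(out)
-- ===== SOURCE B (Python) =====
-- def _is_meta(line):
--     s = line.strip()
--     return s.startswith("**") or s == "" or s == "---"
--
--
-- def strip_first_h1_block(md_text: str) -> str:
--     """Remove the first H1 + its leading metadata block; the cover page replaces it."""
--     lines = md_text.splitlines()
--     h1 = -1
--     for i, line in enumerate(lines):
--         if line.startswith("# "):
--             h1 = i
--             break
--     if h1 < 0:
--         return "\n".join(lines)
--     rest = lines[h1 + 1:]
--     while rest and _is_meta(rest[0]):
--         rest = rest[1:]
--     return "\n".join(lines[:h1] + rest)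
-- ===== Notes on version B (the rewrite author's own statement) =====
-- stated objective: simpler
-- what changed: Replaces the single flag-driven pass (seen_h1/skipping_meta state machine) by two explicit phases: locate the first H1 line, then drop the metadata lines after it, and rebuild via slicing.
import Mathlib
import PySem

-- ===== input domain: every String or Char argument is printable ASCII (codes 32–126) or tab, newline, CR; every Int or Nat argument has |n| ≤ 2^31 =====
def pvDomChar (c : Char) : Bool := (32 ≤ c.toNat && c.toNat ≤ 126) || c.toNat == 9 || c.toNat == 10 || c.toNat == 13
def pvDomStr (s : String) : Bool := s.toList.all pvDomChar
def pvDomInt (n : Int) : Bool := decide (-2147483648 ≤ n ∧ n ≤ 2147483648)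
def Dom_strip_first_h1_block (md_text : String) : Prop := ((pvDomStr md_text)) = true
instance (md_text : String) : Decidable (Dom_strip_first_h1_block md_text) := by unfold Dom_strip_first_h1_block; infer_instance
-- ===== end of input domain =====

-- B replaces A's flag-driven single pass by two explicit phases (locate the first H1, then drop its metadata lines) and slicing; same cost, plainer structure.

-- ===== PORT A =====
-- line.strip().startswith("**") or line.strip() == "" or line.strip() == "---"
def pvIsMetaA (line : String) : Bool :=
  PySem.Str.startswith (PySem.Str.strip line) "**" || PySem.Str.strip line == "" || PySem.Str.strip line == "---"

-- A's for-loop over lines with the (seen_h1, skipping_meta) flags, building `out`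
def pvLoopA : List String → Bool → Bool → List String
  | [], _, _ => []
  | line :: rest, seen, skip =>
    if !seen && PySem.Str.startswith line "# " then pvLoopA rest true true
    else if skip then
      if pvIsMetaA line then pvLoopA rest seen skip
      else line :: pvLoopA rest seen false
    else line :: pvLoopA rest seen skip

def strip_first_h1_block (md_text : String) : String :=
  PySem.Str.join "\n" (pvLoopA (PySem.Str.splitlines md_text) false false)

-- ===== PORT B =====
def pvIsMetaB (line : String) : Bool :=
  PySem.Str.startswith (PySem.Str.strip line) "**" || PySem.Str.strip line == "" || PySem.Str.strip line == "---"

-- phase 1: split the lines at the first H1: some (prefix-before-H1, lines-after-H1), none if no H1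
def pvFindH1 : List String → Option (List String × List String)
  | [] => none
  | line :: rest =>
    if PySem.Str.startswith line "# " then some ([], rest)
    else (pvFindH1 rest).map (fun pr => (line :: pr.1, pr.2))

-- phase 2: the while-loop consuming the metadata lines
def pvDropMeta : List String → List String
  | [] => []
  | line :: rest => if pvIsMetaB line then pvDropMeta rest else line :: rest

def strip_first_h1_block_alt (md_text : String) : String :=
  match pvFindH1 (PySem.Str.splitlines md_text) with
  | none => PySem.Str.join "\n" (PySem.Str.splitlines md_text)
  | some (pre, rest) => PySem.Str.join "\n" (pre ++ pvDropMeta rest)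

-- ===== PRECONDITION & SPEC =====
def Spec_strip_first_h1_block (md_text : String) (out : String) : Prop := out = strip_first_h1_block_alt md_text
instance (md_text : String) (out : String) : Decidable (Spec_strip_first_h1_block md_text out) := by unfold Spec_strip_first_h1_block; infer_instance

-- ===== CLAIM (what is proved, stated in full; the proofs are below) =====
def Claim_equal_strip_first_h1_block : Prop := ∀ (md_text : String), Dom_strip_first_h1_block md_text → Spec_strip_first_h1_block md_text (strip_first_h1_block md_text)

-- ===== LEMMAS AND PROOFS =====
-- once the H1 is seen and meta-skipping over, A appends every remaining line
theorem pvLoopA_true_false (ls : List String) : pvLoopA ls true false = ls := by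
  induction ls with
  | nil => rfl
  | cons l rest ih => simp [pvLoopA, ih]

-- in the meta-skipping state A's loop is exactly pvDropMeta
theorem pvLoopA_true_true (ls : List String) : pvLoopA ls true true = pvDropMeta ls := by
  induction ls with
  | nil => rfl
  | cons l rest ih =>
    simp only [pvLoopA, pvDropMeta, Bool.not_true, Bool.false_and, Bool.false_eq_true, if_false]
    have h' : pvIsMetaA l = pvIsMetaB l := rfl
    rw [h']
    by_cases h : pvIsMetaB l = true
    · simp [h, ih]
    · simp [h, pvLoopA_true_false]

theorem pvLoopA_eq_alt (ls : List String) :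
    pvLoopA ls false false =
      (match pvFindH1 ls with
       | none => ls
       | some (pre, rest) => pre ++ pvDropMeta rest) := by
  induction ls with
  | nil => rfl
  | cons l rest ih =>
    by_cases h : PySem.Str.startswith l "# " = true
    · simp only [pvLoopA, pvFindH1, h, Bool.not_false, Bool.true_and, if_true]
      simp [pvLoopA_true_true]
    · simp only [pvLoopA, pvFindH1, h, Bool.not_false, Bool.true_and, if_neg, Bool.false_eq_true,
        not_false_eq_true, if_false]
      rw [ih]
      cases hf : pvFindH1 rest with
      | none => simp [hf]
      | some pr => cases pr; simp [hf]

-- ===== VERDICT (by name: the statement is the Claim_ definition above) =====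
theorem strip_first_h1_block_spec : Claim_equal_strip_first_h1_block := by
  intro md _
  unfold Spec_strip_first_h1_block strip_first_h1_block strip_first_h1_block_alt
  rw [pvLoopA_eq_alt]
  cases hf : pvFindH1 (PySem.Str.splitlines md) with
  | none => simp
  | some pr => cases pr; simp
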